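-- pv_equiv track=rewrite | github.com/SuperScript-PRC/SkyblueRPG | ToolDelta类式插件/虚拟背包/__init__.py | in_category
-- ===== SOURCE A (Python) =====
-- def in_category(_category: str, _parent_category: str):
--     category = _category.split(":")
--     parent_category = _parent_category.split(":")
--     if len(category) < len(parent_category):
--         return False
--     for c, c2 in zip(parent_category, category):
--         if c != c2:
--             return False
--     return True
-- ===== SOURCE B (Python) =====
-- def in_category(_category: str, _parent_category: str):
--     return (_category + ":").startswith(_parent_category + ":")
-- ===== Notes on version B (the rewrite author's own statement) =====
-- stated objective: simpler
-- what changed: Replaced the split-into-segments, length-check and element-wise zip loop with a single sentinel-terminated string prefix test: (_category + ':').startswith(_parent_category + ':').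
import Mathlib
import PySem

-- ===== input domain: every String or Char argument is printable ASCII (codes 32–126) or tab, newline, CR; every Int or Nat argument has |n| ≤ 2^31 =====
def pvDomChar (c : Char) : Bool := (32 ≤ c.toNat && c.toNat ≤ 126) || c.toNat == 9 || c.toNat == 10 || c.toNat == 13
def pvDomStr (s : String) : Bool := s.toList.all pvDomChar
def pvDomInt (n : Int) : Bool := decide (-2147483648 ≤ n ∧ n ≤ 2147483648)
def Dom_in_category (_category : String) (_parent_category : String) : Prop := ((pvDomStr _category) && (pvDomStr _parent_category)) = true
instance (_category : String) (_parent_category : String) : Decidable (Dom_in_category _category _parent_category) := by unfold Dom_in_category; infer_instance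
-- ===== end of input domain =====

-- B replaces A's split/length-check/zip loop with one sentinel-terminated prefix test (simpler, same cost).

-- ===== PORT A =====
-- the 'for c, c2 in zip(...): if c != c2: return False / return True' loop
def inCatLoopA : List (List Char × List Char) → Bool
  | [] => true
  | (c, c2) :: rest => if c ≠ c2 then false else inCatLoopA rest

def in_category (_category : String) (_parent_category : String) : Bool :=
  let category := PySem.Chars.splitOn _category.toList [':']
  let parent_category := PySem.Chars.splitOn _parent_category.toList [':']
  if category.length < parent_category.length then false
  else inCatLoopA (parent_category.zip category)

-- ===== PORT B =====
def in_category_alt (_category : String) (_parent_category : String) : Bool :=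
  PySem.Chars.startswith (_category.toList ++ [':']) (_parent_category.toList ++ [':'])

-- ===== PRECONDITION & SPEC =====
def Spec_in_category (_category : String) (_parent_category : String) (out : Bool) : Prop := out = in_category_alt _category _parent_category
instance (_category : String) (_parent_category : String) (out : Bool) : Decidable (Spec_in_category _category _parent_category out) := by unfold Spec_in_category; infer_instance

-- ===== CLAIM (what is proved, stated in full; the proofs are below) =====
def Claim_equal_in_category : Prop := ∀ (_category : String) (_parent_category : String), Dom_in_category _category _parent_category → Spec_in_category _category _parent_category (in_category _category _parent_category)

-- ===== LEMMAS AND PROOFS =====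

-- structural characterisation of splitting on the single character ':'
def spC : List Char → List (List Char)
  | [] => [[]]
  | c :: rest => if c = ':' then [] :: spC rest else (spC rest).modifyHead (c :: ·)

theorem spC_ne_nil (cs : List Char) : spC cs ≠ [] := by
  induction cs with
  | nil => simp [spC]
  | cons c rest ih =>
    simp only [spC]
    split
    · simp
    · intro h
      apply ih
      cases h' : spC rest with
      | nil => rfl
      | cons a t => rw [h'] at h; simp [List.modifyHead] at h

theorem go_eq_spC (fuel : Nat) (l cur : List Char) (acc : List (List Char))
    (h : l.length < fuel) :
    PySem.Chars.splitOn.go [':'] fuel l cur acc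
      = acc.reverse ++ (spC l).modifyHead (cur.reverse ++ ·) := by
  induction fuel generalizing l cur acc with
  | zero => omega
  | succ fuel ih =>
    cases l with
    | nil =>
      simp [PySem.Chars.splitOn.go, spC, List.modifyHead]
    | cons c rest =>
      rw [PySem.Chars.splitOn.go]
      by_cases hc : c = ':'
      · subst hc
        have hpre : List.isPrefixOf [':'] (':' :: rest) = true := by
          simp [List.isPrefixOf]
        simp only [hpre, if_pos]
        rw [show List.drop [':'].length (':' :: rest) = rest from rfl]
        rw [ih rest [] _ (by simpa using Nat.lt_of_succ_lt_succ h)]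
        have hsp : spC (':' :: rest) = [] :: spC rest := by simp [spC]
        rw [hsp]
        cases hv : spC rest <;> simp [List.modifyHead]
      · have hpre : List.isPrefixOf [':'] (c :: rest) = false := by
          simp [List.isPrefixOf]
          exact fun h' => (hc h'.symm).elim
        simp only [hpre, Bool.false_eq_true, if_neg, not_false_iff]
        rw [ih rest (c :: cur) acc (by simpa using Nat.lt_of_succ_lt_succ h)]
        congr 1
        rw [spC]
        simp only [if_neg hc, List.modifyHead_modifyHead]
        congr 1
        funext x
        simp [Function.comp]
  
theorem splitOn_eq_spC (cs : List Char) : PySem.Chars.splitOn cs [':'] = spC cs := by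
  rw [PySem.Chars.splitOn, go_eq_spC (cs.length + 1) cs [] [] (Nat.lt_succ_self _)]
  cases h : spC cs with
  | nil => exact absurd h (spC_ne_nil cs)
  | cons a t => simp [List.modifyHead]

-- A's loop over the zip, under the length check, is exactly list-isPrefixOf
theorem loopA_eq_isPrefixOf (ps cs : List (List Char)) (h : ps.length ≤ cs.length) :
    inCatLoopA (ps.zip cs) = List.isPrefixOf ps cs := by
  induction ps generalizing cs with
  | nil => simp [inCatLoopA, List.isPrefixOf]
  | cons p ps' ih =>
    cases cs with
    | nil => simp at h
    | cons c cs' =>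
      simp only [List.zip_cons_cons, inCatLoopA, List.isPrefixOf]
      by_cases hpc : p = c
      · subst hpc
        simp [ih cs' (by simpa using h)]
      · have hb : (p == c) = false := beq_eq_false_iff_ne.mpr hpc
        simp [hpc, hb]

theorem isPrefixOf_eq_false_of_lt {α : Type} [BEq α] [LawfulBEq α]
    (X Y : List α) (h : Y.length < X.length) : List.isPrefixOf X Y = false := by
  by_contra hx
  have : List.isPrefixOf X Y = true := by
    cases hv : List.isPrefixOf X Y
    · exact absurd hv hx
    · rfl
  have := List.IsPrefix.length_le (List.isPrefixOf_iff_prefix.mp this)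
  omega

-- key lemma: segment-wise prefix = sentinel-terminated string prefix
theorem spC_prefix_iff (ps cs : List Char) :
    List.isPrefixOf (spC ps) (spC cs) = List.isPrefixOf (ps ++ [':']) (cs ++ [':']) := by
  induction ps generalizing cs with
  | nil =>
    cases cs with
    | nil => simp [spC, List.isPrefixOf]
    | cons c cs' =>
      by_cases hc : c = ':'
      · subst hc; simp [spC, List.isPrefixOf]
      · obtain ⟨h, t, hht⟩ : ∃ h t, spC cs' = h :: t := by
          cases hv : spC cs' with
          | nil => exact absurd hv (spC_ne_nil cs')
          | cons a t => exact ⟨a, t, rfl⟩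
        simp [spC, if_neg hc, hht, List.modifyHead, List.isPrefixOf, Ne.symm hc]
  | cons a ps' ih =>
    by_cases ha : a = ':'
    · subst ha
      cases cs with
      | nil =>
        have hne : ps' ++ [':'] ≠ [] := by simp
        obtain ⟨h, t, hht⟩ : ∃ h t, spC ps' = h :: t := by
          cases hv : spC ps' with
          | nil => exact absurd hv (spC_ne_nil ps')
          | cons x t => exact ⟨x, t, rfl⟩
        cases hv : ps' ++ [':'] with
        | nil => exact absurd hv hne
        | cons x xs => simp [spC, List.isPrefixOf, hht, hv]
      | cons c cs' =>
        by_cases hc : c = ':'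
        · subst hc
          simp [spC, ih cs']
        · obtain ⟨h, t, hht⟩ : ∃ h t, spC cs' = h :: t := by
            cases hv : spC cs' with
            | nil => exact absurd hv (spC_ne_nil cs')
            | cons x t => exact ⟨x, t, rfl⟩
          simp [spC, if_neg hc, hht, List.modifyHead, List.isPrefixOf, Ne.symm hc]
    · obtain ⟨hp, tp, hhp⟩ : ∃ h t, spC ps' = h :: t := by
        cases hv : spC ps' with
        | nil => exact absurd hv (spC_ne_nil ps')
        | cons x t => exact ⟨x, t, rfl⟩
      cases cs with
      | nil =>
        simp [spC, hhp, List.modifyHead, List.isPrefixOf, ha]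
      | cons c cs' =>
        by_cases hc : c = ':'
        · subst hc
          simp [spC, hhp, List.modifyHead, List.isPrefixOf, ha]
        · obtain ⟨hcs, tcs, hhc⟩ : ∃ h t, spC cs' = h :: t := by
            cases hv : spC cs' with
            | nil => exact absurd hv (spC_ne_nil cs')
            | cons x t => exact ⟨x, t, rfl⟩
          by_cases hac : a = c
          · subst hac
            have := ih cs'
            simp [spC, if_neg ha, hhp, hhc, List.modifyHead, List.isPrefixOf] at this ⊢
            exact this
          · have hb : (a == c) = false := beq_eq_false_iff_ne.mpr hac
            simp [spC, if_neg ha, if_neg hc, hhp, hhc, List.modifyHead, List.isPrefixOf, hb]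

-- ===== VERDICT (by name: the statement is the Claim_ definition above) =====
theorem in_category_spec : Claim_equal_in_category := by
  intro c p _
  unfold Spec_in_category in_category in_category_alt
  simp only [splitOn_eq_spC]
  rw [PySem.Chars.startswith]
  by_cases hlen : (spC c.toList).length < (spC p.toList).length
  · rw [if_pos hlen, ← spC_prefix_iff, isPrefixOf_eq_false_of_lt _ _ hlen]
  · rw [if_neg hlen, loopA_eq_isPrefixOf _ _ (by omega), spC_prefix_iff]
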